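-- pv_equiv track=rewrite | github.com/TimothySjiang/leetcodepy | sumOfString.py | sumString
-- ===== SOURCE A (Python) =====
-- def sumString(s1,s2):
--     if not s1: return s2
--     if not s2: return s1
--     i1, i2 = len(s1) - 1, len(s2) - 1
--     res = ''
--     while i1 >= 0 and i2 >= 0:
--         ch1 = s1[i1]
--         ch2 = s2[i2]
--         i1,i2 = i1 - 1, i2 - 1
--         res += str(int(ch1) + int(ch2))
--     while i1 >= 0:
--         res += s1[i1]
--         i1 -= 1
--     while i2 >= 0:
--         res += s2[i2]
--         i2 -= 1
--
--     return res[::-1]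
-- ===== SOURCE B (Python) =====
-- def sumString(s1, s2):
--     if not s1: return s2
--     if not s2: return s1
--     n = min(len(s1), len(s2))
--     sums = ''.join(str(int(a) + int(b)) for a, b in zip(s1[::-1], s2[::-1]))
--     return s1[:len(s1) - n] + s2[:len(s2) - n] + sums[::-1]
-- ===== Notes on version B (the rewrite author's own statement) =====
-- stated objective: idiomatic
-- what changed: Replaces A's three index-driven while loops with character-by-character string accumulation and a final full reversal by a slice of the non-overlapping prefix plus a join of the per-position digit-sum strings over the zipped reversed suffixes, reversed once; Pre_ excludes exactly the inputs where A raises ValueError (a non-digit character in the overlapping suffixes of two non-empty strings).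
import Mathlib
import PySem

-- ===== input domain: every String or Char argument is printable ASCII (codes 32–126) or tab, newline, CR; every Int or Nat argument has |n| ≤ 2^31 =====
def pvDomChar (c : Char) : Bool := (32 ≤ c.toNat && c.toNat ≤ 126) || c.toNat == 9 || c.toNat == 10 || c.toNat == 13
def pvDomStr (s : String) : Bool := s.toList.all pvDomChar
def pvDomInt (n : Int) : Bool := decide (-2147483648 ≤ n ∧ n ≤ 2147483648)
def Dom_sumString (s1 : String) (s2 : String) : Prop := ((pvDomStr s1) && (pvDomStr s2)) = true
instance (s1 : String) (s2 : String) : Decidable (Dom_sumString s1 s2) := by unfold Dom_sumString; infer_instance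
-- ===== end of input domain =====

-- B replaces A's three index-driven while loops with character-by-character accumulation and a
-- final full reversal by slicing off the non-overlapping prefix and joining the per-position
-- digit-sum strings of the zipped reversed suffixes; alternative decomposition, same cost.

-- int(ch) for a one-character string (ValueError = none; Pre_ excludes that, getD 0 is never hit there)
def pvDig (c : Char) : Int := (PySem.Int.ofChars? [c]).getD 0

-- ===== PORT A =====
-- while i1 >= 0 and i2 >= 0: res += str(int(s1[i1]) + int(s2[i2])); i1,i2 -= 1
def sumStringLoop1 (l1 l2 : List Char) (i1 i2 : Int) (res : List Char) : Int × Int × List Char :=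
  if 0 ≤ i1 ∧ 0 ≤ i2 then
    let ch1 := PySem.List.pyGetD l1 i1 ' '
    let ch2 := PySem.List.pyGetD l2 i2 ' '
    sumStringLoop1 l1 l2 (i1 - 1) (i2 - 1) (res ++ PySem.Int.toChars (pvDig ch1 + pvDig ch2))
  else (i1, i2, res)
termination_by (i1 + 1).toNat
decreasing_by omega

-- while i >= 0: res += s[i]; i -= 1
def sumStringLoop2 (l : List Char) (i : Int) (res : List Char) : List Char :=
  if 0 ≤ i then sumStringLoop2 l (i - 1) (res ++ [PySem.List.pyGetD l i ' ']) else res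
termination_by (i + 1).toNat
decreasing_by omega

def sumString (s1 : String) (s2 : String) : String :=
  if s1.toList = [] then s2
  else if s2.toList = [] then s1
  else
    let l1 := s1.toList
    let l2 := s2.toList
    let r := sumStringLoop1 l1 l2 ((l1.length : Int) - 1) ((l2.length : Int) - 1) []
    let resA := sumStringLoop2 l1 r.1 r.2.2
    let resB := sumStringLoop2 l2 r.2.1 resA
    String.ofList resB.reverse   -- res[::-1]

-- ===== PORT B =====
def sumString_alt (s1 : String) (s2 : String) : String :=
  if s1.toList = [] then s2
  else if s2.toList = [] then s1
  else
    let l1 := s1.toList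
    let l2 := s2.toList
    let n := min l1.length l2.length
    -- sums = ''.join(str(int(a) + int(b)) for a, b in zip(s1[::-1], s2[::-1]))
    let sums := (l1.reverse.zip l2.reverse).flatMap
      (fun p => PySem.Int.toChars (pvDig p.1 + pvDig p.2))
    -- s1[:len(s1) - n] + s2[:len(s2) - n] + sums[::-1]
    String.ofList (PySem.List.slice l1 none (some ((l1.length : Int) - n)) ++
                   PySem.List.slice l2 none (some ((l2.length : Int) - n)) ++
                   sums.reverse)

-- ===== PRECONDITION & SPEC =====
-- Pre_ excludes exactly the inputs where Python A raises ValueError: both strings non-empty and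
-- some character of the overlapping suffixes (the last min(len1,len2) characters of each) is not a digit.
def Pre_sumString (s1 : String) (s2 : String) : Prop :=
  s1 = "" ∨ s2 = "" ∨
    ((s1.toList.drop (s1.toList.length - min s1.toList.length s2.toList.length)) ++
     (s2.toList.drop (s2.toList.length - min s1.toList.length s2.toList.length))).all Char.isDigit = true
instance (s1 : String) (s2 : String) : Decidable (Pre_sumString s1 s2) := by unfold Pre_sumString; infer_instance

def pvWitness_sumString : String × String := ("129", "45")

def Spec_sumString (s1 : String) (s2 : String) (out : String) : Prop := out = sumString_alt s1 s2
instance (s1 : String) (s2 : String) (out : String) : Decidable (Spec_sumString s1 s2 out) := by unfold Spec_sumString; infer_instance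

-- ===== CLAIM (what is proved, stated in full; the proofs are below) =====
def Claim_equal_sumString : Prop := ∀ (s1 : String) (s2 : String), Dom_sumString s1 s2 → Pre_sumString s1 s2 → Spec_sumString s1 s2 (sumString s1 s2)

-- ===== LEMMAS AND PROOFS =====

-- the digit-sum chunk produced for one aligned pair of characters
def pvPiece (a b : Char) : List Char := PySem.Int.toChars (pvDig a + pvDig b)

-- what loop1 accumulates, consuming both lists from the front (A consumes from the back, so this
-- is applied to the REVERSED lists)
def pvG : List Char → List Char → List Char
  | a :: as, b :: bs => pvPiece a b ++ pvG as bs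
  | _, _ => []

theorem pvG_nil_right (as : List Char) : pvG as [] = [] := by cases as <;> rfl

-- pvG is exactly B's flatMap over the zip
theorem pvG_eq_zip_flatMap (as bs : List Char) :
    pvG as bs = (as.zip bs).flatMap (fun p => pvPiece p.1 p.2) := by
  induction as generalizing bs with
  | nil => cases bs <;> rfl
  | cons a as ih =>
    cases bs with
    | nil => rfl
    | cons b bs => simp [pvG, List.zip_cons_cons, ih]

theorem take_succ_reverse (l : List Char) (n : Nat) (h : n < l.length) :
    (l.take (n + 1)).reverse = l[n] :: (l.take n).reverse := by
  rw [List.take_add_one, List.getElem?_eq_getElem h]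
  simp

theorem loop1_spec (n1 : Nat) : ∀ (n2 : Nat) (l1 l2 res : List Char),
    n1 ≤ l1.length → n2 ≤ l2.length →
    sumStringLoop1 l1 l2 ((n1 : Int) - 1) ((n2 : Int) - 1) res =
      ((n1 : Int) - min n1 n2 - 1, (n2 : Int) - min n1 n2 - 1,
       res ++ pvG (l1.take n1).reverse (l2.take n2).reverse) := by
  induction n1 with
  | zero =>
    intro n2 l1 l2 res h1 h2
    rw [sumStringLoop1]
    simp [pvG]
  | succ n1 ih =>
    intro n2 l1 l2 res h1 h2
    cases n2 with
    | zero =>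
      rw [sumStringLoop1]
      simp [pvG_nil_right]
    | succ n2 =>
      rw [sumStringLoop1]
      have hc : (0 : Int) ≤ (n1 + 1 : Nat) - 1 ∧ (0 : Int) ≤ (n2 + 1 : Nat) - 1 := by
        constructor <;> (push_cast; omega)
      rw [if_pos hc]
      have e1 : ((n1 + 1 : Nat) : Int) - 1 - 1 = (n1 : Int) - 1 := by push_cast; omega
      have e2 : ((n2 + 1 : Nat) : Int) - 1 - 1 = (n2 : Int) - 1 := by push_cast; omega
      have g1 : PySem.List.pyGetD l1 ((n1 + 1 : Nat) - 1 : Int) ' ' = l1[n1]'(by omega) := by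
        have e : ((n1 + 1 : Nat) : Int) - 1 = (n1 : Nat) := by push_cast; omega
        rw [e]
        simp [List.getD, List.getElem?_eq_getElem (show n1 < l1.length by omega)]
      have g2 : PySem.List.pyGetD l2 ((n2 + 1 : Nat) - 1 : Int) ' ' = l2[n2]'(by omega) := by
        have e : ((n2 + 1 : Nat) : Int) - 1 = (n2 : Nat) := by push_cast; omega
        rw [e]
        simp [List.getD, List.getElem?_eq_getElem (show n2 < l2.length by omega)]
      simp only [g1, g2, e1, e2]
      rw [ih n2 l1 l2 _ (by omega) (by omega)]
      rw [take_succ_reverse l1 n1 (by omega), take_succ_reverse l2 n2 (by omega)]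
      simp only [pvG, pvPiece, Prod.mk.injEq]
      refine ⟨by push_cast; omega, by push_cast; omega, by simp⟩

theorem loop2_spec (n : Nat) : ∀ (l res : List Char), n ≤ l.length →
    sumStringLoop2 l ((n : Int) - 1) res = res ++ (l.take n).reverse := by
  induction n with
  | zero => intro l res h; rw [sumStringLoop2]; simp
  | succ n ih =>
    intro l res h
    rw [sumStringLoop2]
    rw [if_pos (by push_cast; omega)]
    have e : ((n + 1 : Nat) : Int) - 1 - 1 = (n : Int) - 1 := by push_cast; omega
    have g : PySem.List.pyGetD l ((n + 1 : Nat) - 1 : Int) ' ' = l[n]'(by omega) := by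
      have e : ((n + 1 : Nat) : Int) - 1 = (n : Nat) := by push_cast; omega
      rw [e]
      simp [List.getD, List.getElem?_eq_getElem (show n < l.length by omega)]
    rw [e, g, ih l _ (by omega), take_succ_reverse l n (by omega)]
    simp

-- ===== VERDICT (by name: the statement is the Claim_ definition above) =====
theorem sumString_spec : Claim_equal_sumString := by
  intro s1 s2 _ _
  unfold Spec_sumString sumString sumString_alt
  by_cases h1 : s1.toList = []
  · simp [h1]
  by_cases h2 : s2.toList = []
  · simp [h1, h2]
  rw [if_neg h1, if_neg h2, if_neg h1, if_neg h2]
  dsimp only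
  set l1 := s1.toList with hl1
  set l2 := s2.toList with hl2
  set m := min l1.length l2.length with hm
  have hmle1 : m ≤ l1.length := by rw [hm]; omega
  have hmle2 : m ≤ l2.length := by rw [hm]; omega
  -- A side: the three loops
  have hA1 := loop1_spec l1.length l2.length l1 l2 [] (le_refl _) (le_refl _)
  rw [List.take_length, List.take_length, ← hm] at hA1
  have em1 : (l1.length : Int) - m - 1 = ((l1.length - m : Nat) : Int) - 1 := by omega
  have em2 : (l2.length : Int) - m - 1 = ((l2.length - m : Nat) : Int) - 1 := by omega
  rw [hA1]
  simp only [em1, em2]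
  rw [loop2_spec (l1.length - m) l1 _ (by omega), loop2_spec (l2.length - m) l2 _ (by omega)]
  set p1 := l1.take (l1.length - m) with hp1
  set p2 := l2.take (l2.length - m) with hp2
  have hp12 : p1 = [] ∨ p2 = [] := by
    rcases Nat.le_total l1.length l2.length with he | he
    · left; rw [hp1]
      have hz : l1.length - m = 0 := by omega
      simp [hz]
    · right; rw [hp2]
      have hz : l2.length - m = 0 := by omega
      simp [hz]
  -- B side: the prefix slices are p1 and p2
  have hpreB1 : PySem.List.slice l1 none (some ((l1.length : Int) - m)) = p1 := by
    have e : (l1.length : Int) - m = ((l1.length - m : Nat) : Int) := by omega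
    rw [e, PySem.List.slice_to_natCast, hp1]
  have hpreB2 : PySem.List.slice l2 none (some ((l2.length : Int) - m)) = p2 := by
    have e : (l2.length : Int) - m = ((l2.length - m : Nat) : Int) := by omega
    rw [e, PySem.List.slice_to_natCast, hp2]
  rw [hpreB1, hpreB2, pvG_eq_zip_flatMap]
  simp only [pvPiece]
  -- both sides are now prefix(es) plus the reversed pvG chunk; one prefix is empty
  simp only [List.reverse_append, List.reverse_reverse, List.append_assoc]
  rcases hp12 with hc | hc <;> simp [hc]
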